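-- pv_equiv track=rewrite | github.com/GarrettXUPT/papper | verionCon/booleanFunctionVersion1/RSBF.py | midProcess
-- ===== SOURCE A (Python) =====
-- def midProcess(varsNum, dicIndexList, allTable):
--     resList = []
--     hang = len(dicIndexList)
--     for ele in allTable:
--         resTmpList = []
--         for i in range(0, hang):
--             if list(dicIndexList[i].values())  == ele:
--                 resTmpList.append(1)
--             else:
--                 resTmpList.append(0)
--         resList.append(sum(resTmpList) % 2)
--     return resList
-- ===== SOURCE B (Python) =====
-- def midProcess(varsNum, dicIndexList, allTable):
--     counts = {}
--     for d in dicIndexList: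
--         key = tuple(d.values())
--         counts[key] = counts.get(key, 0) + 1
--     return [counts.get(tuple(row), 0) % 2 for row in allTable]
-- ===== Notes on version B (the rewrite author's own statement) =====
-- stated objective: faster
-- what changed: Replaced the per-row inner scan over all dicts (comparing each dict's value list to the row) by a dictionary of value-tuple counts built once, so each row is a single hash lookup mod 2.
import Mathlib
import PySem

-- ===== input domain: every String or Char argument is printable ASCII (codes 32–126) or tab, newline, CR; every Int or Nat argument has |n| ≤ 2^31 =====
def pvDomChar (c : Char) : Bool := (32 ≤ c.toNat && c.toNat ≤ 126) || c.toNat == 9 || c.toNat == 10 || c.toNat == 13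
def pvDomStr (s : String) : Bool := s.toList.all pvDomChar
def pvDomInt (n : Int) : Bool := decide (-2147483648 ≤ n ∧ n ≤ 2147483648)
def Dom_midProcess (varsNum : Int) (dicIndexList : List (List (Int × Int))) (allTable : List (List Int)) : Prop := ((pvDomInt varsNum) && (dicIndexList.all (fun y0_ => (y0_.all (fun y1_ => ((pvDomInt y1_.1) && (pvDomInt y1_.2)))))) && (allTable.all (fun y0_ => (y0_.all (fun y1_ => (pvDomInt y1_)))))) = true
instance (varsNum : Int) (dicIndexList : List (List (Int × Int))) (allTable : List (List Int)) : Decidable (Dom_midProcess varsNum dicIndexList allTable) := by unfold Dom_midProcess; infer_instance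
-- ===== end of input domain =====

-- ===== PORT A =====
-- B replaces A's per-row scan over all dicts by a count dictionary built once (one lookup per row).
def midProcess (varsNum : Int) (dicIndexList : List (List (Int × Int))) (allTable : List (List Int)) : List Int :=
  let hang : Int := (dicIndexList.length : Int)
  allTable.foldl (fun resList ele =>
    let resTmpList : List Int :=
      (PySem.List.pyRange 0 hang 1).foldl (fun t i =>
        if (PySem.Dict.ofList (PySem.List.pyGetD dicIndexList i [])).values = ele
        then t ++ [(1 : Int)] else t ++ [(0 : Int)]) []
    resList ++ [PySem.Int.mod resTmpList.sum 2]) []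

-- ===== PORT B =====
def midProcess_alt (varsNum : Int) (dicIndexList : List (List (Int × Int))) (allTable : List (List Int)) : List Int :=
  let counts : PySem.Dict (List Int) Int :=
    dicIndexList.foldl (fun c d =>
      let key := (PySem.Dict.ofList d).values
      c.insert key (c.getD key 0 + 1)) PySem.Dict.empty
  allTable.map (fun row => PySem.Int.mod (counts.getD row 0) 2)

-- ===== PRECONDITION & SPEC =====
def Spec_midProcess (varsNum : Int) (dicIndexList : List (List (Int × Int))) (allTable : List (List Int)) (out : List Int) : Prop := out = midProcess_alt varsNum dicIndexList allTable
instance (varsNum : Int) (dicIndexList : List (List (Int × Int))) (allTable : List (List Int)) (out : List Int) : Decidable (Spec_midProcess varsNum dicIndexList allTable out) := by unfold Spec_midProcess; infer_instance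

-- ===== CLAIM (what is proved, stated in full; the proofs are below) =====
def Claim_equal_midProcess : Prop := ∀ (varsNum : Int) (dicIndexList : List (List (Int × Int))) (allTable : List (List Int)), Dom_midProcess varsNum dicIndexList allTable → Spec_midProcess varsNum dicIndexList allTable (midProcess varsNum dicIndexList allTable)

-- ===== LEMMAS AND PROOFS =====

-- A's inner accumulation of 1/0 flags is the map of the indicator over the list.
lemma foldl_ite_append {α : Type} (P : α → Bool) (l : List α) (acc : List Int) :
    l.foldl (fun t x => if P x then t ++ [(1 : Int)] else t ++ [(0 : Int)]) acc
      = acc ++ l.map (fun x => if P x then (1 : Int) else (0 : Int)) := by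
  have h : (fun (t : List Int) x => if P x then t ++ [(1 : Int)] else t ++ [(0 : Int)])
      = fun t x => t ++ [if P x then (1 : Int) else (0 : Int)] := by
    funext t x; by_cases hp : P x <;> simp [hp]
  rw [h, PySem.List.foldl_append_singleton_eq_map]

-- Each row's entry in A equals the count of matching value-lists, mod 2 — the value B looks up.
lemma entry_eq (dicIndexList : List (List (Int × Int))) (ele : List Int) :
    ((PySem.List.pyRange 0 ((dicIndexList.length : Int)) 1).foldl (fun t i =>
        if (PySem.Dict.ofList (PySem.List.pyGetD dicIndexList i [])).values = ele
        then t ++ [(1 : Int)] else t ++ [(0 : Int)]) []).sum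
      = (dicIndexList.foldl (fun c d =>
          c.insert (PySem.Dict.ofList d).values
            (c.getD (PySem.Dict.ofList d).values 0 + 1)) PySem.Dict.empty).getD ele 0 := by
  rw [PySem.List.foldl_pyRange_zero_pyGetD' dicIndexList []
        (fun t d => if (PySem.Dict.ofList d).values = ele
          then t ++ [(1 : Int)] else t ++ [(0 : Int)]) []]
  have hfun : (fun (t : List Int) d =>
        if (PySem.Dict.ofList d).values = ele then t ++ [(1 : Int)] else t ++ [(0 : Int)])
      = (fun (t : List Int) (d : List (Int × Int)) =>
        if (fun d => decide ((PySem.Dict.ofList d).values = ele)) d = true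
        then t ++ [(1 : Int)] else t ++ [(0 : Int)]) := by
    funext t d; simp
  rw [hfun, foldl_ite_append (fun d => decide ((PySem.Dict.ofList d).values = ele)) dicIndexList []]
  rw [← List.foldl_map (f := fun d : List (Int × Int) => (PySem.Dict.ofList d).values)
        (g := fun (c : PySem.Dict (List Int) Int) k => c.insert k (c.getD k 0 + 1))
        (l := dicIndexList) (init := PySem.Dict.empty)]
  rw [PySem.Dict.getD_foldl_insert_add_one]
  simp only [List.nil_append]
  rw [PySem.List.sum_map_ite_one_zero]
  simp only [PySem.Dict.getD_empty, zero_add, List.count_eq_countP, List.countP_map]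
  have hpred : (fun x : List (Int × Int) => decide ((PySem.Dict.ofList x).values = ele))
      = ((fun x => x == ele) ∘ fun d : List (Int × Int) => (PySem.Dict.ofList d).values) := by
    funext d
    by_cases h : (PySem.Dict.ofList d).values = ele <;> simp [h, Function.comp]
  rw [hpred]

-- ===== VERDICT (by name: the statement is the Claim_ definition above) =====
theorem midProcess_spec : Claim_equal_midProcess := by
  intro varsNum dicIndexList allTable _
  unfold Spec_midProcess midProcess midProcess_alt
  simp only []
  rw [PySem.List.foldl_append_singleton_eq_map]
  simp only [List.nil_append]
  exact List.map_congr_left (fun ele _ => by rw [entry_eq])
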